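-- pv_equiv track=rewrite | github.com/science-engineering-art/daa | problems/the-bar/src/tester.py | check
-- ===== SOURCE A (Python) =====
-- from typing import List
--
-- def check(a: List[int], k: int) -> int:
--     N = len(a)
--
--     # precalculation of the array with the accumulated sum
--     accum_sum = [0 for _ in range(N+1)]
--     for i, item in enumerate(a):
--         accum_sum[i+1] = item + accum_sum[i]
--
--     # check if any subarray of size K, has non-positive sum
--     l = 0; r = k
--     while r <= N:
--         if accum_sum[r] - accum_sum[l] <= 0:
--             break
--         l += 1; r += 1
--     else:
--         return k
--
--     return -1
-- ===== SOURCE B (Python) =====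
-- from typing import List
--
-- def check(a: List[int], k: int) -> int:
--     # Single-pass sliding window: keep only the running window sum.
--     N = len(a)
--     if k > N:
--         return k          # no window of size k exists
--     if k <= 0:
--         return -1         # degenerate window size: no positive-sum window
--     s = sum(a[:k])
--     if s <= 0:
--         return -1
--     for i in range(k, N):
--         s += a[i] - a[i - k]
--         if s <= 0:
--             return -1
--     return k
-- ===== Notes on version B (the rewrite author's own statement) =====
-- stated objective: simpler
-- what changed: B replaces A's prefix-sum array plus two-index while loop by a single sliding-window pass that maintains only the running window sum (O(1) extra space), with explicit guards for k>N and k<=0.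
import Mathlib
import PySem

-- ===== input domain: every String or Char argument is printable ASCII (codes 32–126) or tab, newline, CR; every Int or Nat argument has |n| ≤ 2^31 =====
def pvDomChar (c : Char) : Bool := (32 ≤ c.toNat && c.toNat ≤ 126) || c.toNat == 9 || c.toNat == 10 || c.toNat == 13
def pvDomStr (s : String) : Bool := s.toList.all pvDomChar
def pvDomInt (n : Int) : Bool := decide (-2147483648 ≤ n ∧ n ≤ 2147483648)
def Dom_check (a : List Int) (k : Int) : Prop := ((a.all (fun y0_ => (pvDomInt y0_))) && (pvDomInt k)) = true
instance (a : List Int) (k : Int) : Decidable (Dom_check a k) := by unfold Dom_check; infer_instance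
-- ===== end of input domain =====

-- B replaces A's prefix-sum array and two-index while loop by a single sliding-window
-- pass keeping only the running window sum; equal to A wherever A returns (Pre_).

-- ===== PORT A =====
-- the while loop: l, r move together; pyGet? none (Python IndexError) is totalized to -1,
-- which is only reachable outside Pre_check
def checkLoop (accum : List Int) (N k : Int) (l r : Int) (fuel : Nat) : Int :=
  match fuel with
  | 0 => k
  | fuel + 1 =>
    if r ≤ N then
      match PySem.List.pyGet? accum r, PySem.List.pyGet? accum l with
      | some ar, some al =>
        if ar - al ≤ 0 then -1 else checkLoop accum N k (l + 1) (r + 1) fuel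
      | _, _ => -1
    else k

def check (a : List Int) (k : Int) : Int :=
  let N : Int := a.length
  -- accum_sum built left to right: accum_sum[i+1] = item + accum_sum[i]
  let accum := (a.foldl (fun st item => (st.1 ++ [st.2 + item], st.2 + item)) ([0], 0)).1
  checkLoop accum N k 0 k ((N - k + 1).toNat + 1)

-- ===== PORT B =====
-- 'for i in range(k, N): s += a[i] - a[i-k]; if s <= 0: return -1' / fall-through returns k
def altGo (a : List Int) (k : Int) (s : Int) : List Int → Int
  | [] => k
  | i :: rest =>
    let s' := s + PySem.List.pyGetD a i 0 - PySem.List.pyGetD a (i - k) 0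
    if s' ≤ 0 then -1 else altGo a k s' rest

def check_alt (a : List Int) (k : Int) : Int :=
  let N : Int := a.length
  if N < k then k
  else if k ≤ 0 then -1
  else
    let s := (PySem.List.slice a none (some k)).sum
    if s ≤ 0 then -1
    else altGo a k s (PySem.List.pyRange k N 1)

-- ===== PRECONDITION & SPEC =====
-- Pre_ excludes exactly k ≤ -(len(a)+2), where A's first access accum_sum[k] raises IndexError.
def Pre_check (a : List Int) (k : Int) : Prop := -((a.length : Int) + 1) ≤ k
instance (a : List Int) (k : Int) : Decidable (Pre_check a k) := by unfold Pre_check; infer_instance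
def pvWitness_check : List Int × Int := ([1, 2, 3], 2)

def Spec_check (a : List Int) (k : Int) (out : Int) : Prop := out = check_alt a k
instance (a : List Int) (k : Int) (out : Int) : Decidable (Spec_check a k out) := by unfold Spec_check; infer_instance

-- ===== CLAIM (what is proved, stated in full; the proofs are below) =====
def Claim_equal_check : Prop := ∀ (a : List Int) (k : Int), Dom_check a k → Pre_check a k → Spec_check a k (check a k)

-- ===== LEMMAS AND PROOFS =====

-- prefix sums: accum_sum[i] = sum of the first i elements
def pvP (a : List Int) (i : Nat) : Int := (a.take i).sum

theorem pvFold_scan (a : List Int) (c : List Int) (s : Int) :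
    (a.foldl (fun st item => (st.1 ++ [st.2 + item], st.2 + item)) (c, s)).1
      = c ++ (List.range a.length).map (fun i => s + (a.take (i + 1)).sum) := by
  induction a generalizing c s with
  | nil => simp
  | cons x t ih =>
    simp only [List.foldl_cons, ih, List.length_cons, List.range_succ_eq_map, List.map_cons,
      List.map_map]
    simp [List.append_assoc, Function.comp]
    intro i _
    ring

theorem pvAccum_eq (a : List Int) :
    (a.foldl (fun st item => (st.1 ++ [st.2 + item], st.2 + item)) (([0] : List Int), (0 : Int))).1
      = (List.range (a.length + 1)).map (pvP a) := by
  rw [pvFold_scan, List.range_succ_eq_map]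
  simp [pvP, Function.comp]

theorem pvGetAccum (a : List Int) (i : Int) (h0 : 0 ≤ i) (h1 : i ≤ (a.length : Int)) :
    PySem.List.pyGet? ((List.range (a.length + 1)).map (pvP a)) i = some (pvP a i.toNat) := by
  rw [PySem.List.pyGet?_of_nonneg (h := h0)]
  have : i.toNat < a.length + 1 := by omega
  simp [List.getElem?_map, List.getElem?_range this]

-- the loop returns k (while-else) once r > N
theorem pvLoop_done (accum : List Int) (N k l r : Int) (h : N < r) (fuel : Nat) :
    checkLoop accum N k l r fuel = k := by
  cases fuel with
  | zero => rfl
  | succ f => unfold checkLoop; rw [if_neg (by omega)]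

-- negative k: the loop always breaks with -1 (or hits the totalized IndexError branch)
theorem pvLoop_neg (accum : List Int) (N k : Int) (hk : k < 0)
    (hlen : (accum.length : Int) = N + 1) :
    ∀ (fuel : Nat) (l r : Int), l = r - k → r ≤ N → l ≤ N + 1 →
    (N - r).toNat + 1 ≤ fuel →
    checkLoop accum N k l r fuel = -1 := by
  intro fuel
  induction fuel with
  | zero => intro l r _ _ _ hf; omega
  | succ f ih =>
    intro l r hlr hr hl hf
    unfold checkLoop
    rw [if_pos hr]
    rcases hgr : PySem.List.pyGet? accum r with _ | ar
    · rfl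
    rcases hgl : PySem.List.pyGet? accum l with _ | al
    · rfl
    have hlN : l ≤ N := by
      by_contra hcon
      have hln1 : l = N + 1 := by omega
      rw [hln1, (PySem.List.pyGet?_eq_none_iff accum (N+1)).mpr
        (by unfold PySem.Raise.InRange; omega)] at hgl
      simp at hgl
    split
    · next ar2 al2 h1 h2 =>
        injection h1 with h1; injection h2 with h2
        subst h1; subst h2
        split
        · rfl
        · exact ih (l+1) (r+1) (by omega) (by omega) (by omega) (by omega)
    · next h => exact (h ar al rfl rfl).elim

-- 0 ≤ k ≤ N: A's window check from start l equals B's sliding loop carrying the window sum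
theorem pvBridge (a : List Int) (kn : Nat) :
    ∀ (fuel l : Nat), l + kn ≤ a.length → a.length - (l + kn) + 1 ≤ fuel →
    checkLoop ((List.range (a.length + 1)).map (pvP a)) (a.length : Int) (kn : Int) (l : Int) ((l : Int) + (kn : Int)) fuel
      = (if pvP a (l + kn) - pvP a l ≤ 0 then -1
         else altGo a (kn : Int) (pvP a (l + kn) - pvP a l) (PySem.List.pyRange ((l : Int) + (kn : Int)) (a.length : Int) 1)) := by
  intro fuel
  induction fuel with
  | zero => intro l _ hf; omega
  | succ f ih =>
    intro l hl hf
    unfold checkLoop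
    rw [if_pos (by omega)]
    have hr : PySem.List.pyGet? ((List.range (a.length + 1)).map (pvP a)) ((l : Int) + (kn : Int))
        = some (pvP a (l + kn)) := by
      have := pvGetAccum a ((l : Int) + (kn : Int)) (by positivity) (by omega)
      rwa [show ((l : Int) + (kn : Int)).toNat = l + kn by omega] at this
    have hlg : PySem.List.pyGet? ((List.range (a.length + 1)).map (pvP a)) (l : Int)
        = some (pvP a l) := by
      have := pvGetAccum a (l : Int) (by positivity) (by omega)
      rwa [Int.toNat_natCast] at this
    rw [hr, hlg]
    split
    case h_2 h => exact (h _ _ rfl rfl).elim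
    case h_1 ar2 al2 h1 h2 =>
      injection h1 with h1; injection h2 with h2
      subst h1; subst h2
      split_ifs with hw
      · rfl
      rcases Nat.eq_or_lt_of_le hl with heq | hlt
      · -- window ends at N: range empty, both loops finish with k
        rw [PySem.List.pyRange_one_eq_nil (by omega)]
        rw [pvLoop_done _ _ _ _ _ (by omega)]
        rfl
      · -- one more window
        rw [PySem.List.pyRange_one_cons (by omega)]
        have e1 : PySem.List.pyGetD a ((l : Int) + (kn : Int)) 0 = a.getD (l + kn) 0 := by
          rw [show (l : Int) + (kn : Int) = ((l + kn : Nat) : Int) by push_cast; ring,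
            PySem.List.pyGetD_natCast]
        have e2 : PySem.List.pyGetD a ((l : Int) + (kn : Int) - (kn : Int)) 0 = a.getD l 0 := by
          rw [show (l : Int) + (kn : Int) - (kn : Int) = ((l : Nat) : Int) by ring,
            PySem.List.pyGetD_natCast]
        unfold altGo
        simp only [e1, e2]
        have hsum : pvP a (l + kn) - pvP a l + a.getD (l + kn) 0 - a.getD l 0
            = pvP a (l + 1 + kn) - pvP a (l + 1) := by
          have s1 : pvP a (l + kn + 1) = pvP a (l + kn) + a[l + kn]'(by omega) :=
            List.sum_take_succ a (l + kn) (by omega)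
          have s2 : pvP a (l + 1) = pvP a l + a[l]'(by omega) :=
            List.sum_take_succ a l (by omega)
          have g1 : a.getD (l + kn) 0 = a[l + kn]'(by omega) := List.getD_eq_getElem a 0 (by omega)
          have g2 : a.getD l 0 = a[l]'(by omega) := List.getD_eq_getElem a 0 (by omega)
          rw [g1, g2, show l + 1 + kn = l + kn + 1 by ring, s1, s2]
          ring
        rw [hsum]
        have := ih (l + 1) (by omega) (by omega)
        rw [show ((l+1 : Nat) : Int) = (l : Int) + 1 by push_cast; ring] at this
        rw [show (l : Int) + 1 + (kn : Int) = (l : Int) + (kn : Int) + 1 by ring] at this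
        rw [this]

-- ===== VERDICT (by name: the statement is the Claim_ definition above) =====
theorem check_spec : Claim_equal_check := by
  intro a k _ hPre
  unfold Spec_check check check_alt
  simp only [pvAccum_eq a]
  by_cases hbig : (a.length : Int) < k
  · rw [if_pos hbig, pvLoop_done _ _ _ _ _ hbig]
  rw [if_neg hbig]
  by_cases hneg : k < 0
  · rw [if_pos (by omega)]
    exact pvLoop_neg _ _ _ hneg (by simp) _ 0 k (by ring) (by omega) (by omega) (by omega)
  · -- 0 ≤ k ≤ N
    have hk0 : 0 ≤ k := by omega
    have hkcast : k = (k.toNat : Int) := by omega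
    have hb := pvBridge a k.toNat ((a.length : Int) - k + 1).toNat.succ 0
      (by omega) (by omega)
    rw [show ((0 : Nat) : Int) = (0 : Int) by rfl, zero_add, ← hkcast, Nat.zero_add] at hb
    rw [show (((a.length : Int) - k + 1).toNat.succ : Nat)
        = ((a.length : Int) - k + 1).toNat + 1 by rfl] at hb
    rw [hb]
    have hP0 : pvP a 0 = 0 := rfl
    rw [hP0, sub_zero]
    by_cases hz : k ≤ 0
    · have : k = 0 := by omega
      subst this
      rw [if_pos (le_refl (0:Int))]
      simp [pvP]
    · rw [if_neg hz]
      rw [PySem.List.slice_to (hb := hk0)]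
      rfl
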